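-- pv_equiv track=rewrite | github.com/MikeFlores19/ANALISIS-Y-DISENIO-DE-ALGORITMOS | LA SUMA XOR/FUERZA_BRUTA SUMA XOR.py | fuerza_bruta
-- ===== SOURCE A (Python) =====
-- def fuerza_bruta(array, l_r):
--     resultados = []
--     for idx, i in enumerate(l_r):
--         l = i[0] -1
--         r = i[1] -1
--         suma = 0
--
--
--         if l == r:
--             suma = array[l]
--         elif abs(l - r) == 1:
--             suma = array[l] + abs(array[l] - array[r])
--         elif (l % 2 != 0) and (r % 2 != 0):
--             for j in range(l, r+1):
--                 xor = array[j]
--                 for k in range(j+1, r):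
--                     xor = abs(xor - array[k])
--                 suma += xor
--         else:
--             for j in range(l, r + 1):
--                 xor = array[j]
--                 for k in range(j + 1, r + 1):
--                     xor = abs(xor - array[k])
--                 suma += xor
--         resultados.append(suma)
--     return resultados
-- ===== SOURCE B (Python) =====
-- def fuerza_bruta(array, l_r):
--     # Same query semantics as A, but each range is answered by a single left-to-right
--     # DP sweep that maintains the vector of partial abs-folds for every start index,
--     # instead of recomputing the inner fold from scratch for each start.
--     resultados = []
--     for a, b in l_r:
--         l = a - 1
--         r = b - 1
--         if l == r:
--             resultados.append(array[l])
--         elif abs(l - r) == 1: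
--             resultados.append(array[l] + abs(array[l] - array[r]))
--         else:
--             odd = (l % 2 != 0) and (r % 2 != 0)
--             hi = r - 1 if odd else r
--             row = []
--             for e in range(l, hi + 1):
--                 ae = array[e]
--                 row = [abs(x - ae) for x in row]
--                 row.append(ae)
--             s = sum(row)
--             if odd and l <= r:
--                 s += array[r]
--             resultados.append(s)
--     return resultados
-- ===== Notes on version B (the rewrite author's own statement) =====
-- stated objective: alternative
-- what changed: Each range query is answered by one left-to-right DP sweep that maintains the vector of abs-fold values for every start index and sums it once, instead of A's nested loops that recompute the fold from scratch for each start.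
import Mathlib
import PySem

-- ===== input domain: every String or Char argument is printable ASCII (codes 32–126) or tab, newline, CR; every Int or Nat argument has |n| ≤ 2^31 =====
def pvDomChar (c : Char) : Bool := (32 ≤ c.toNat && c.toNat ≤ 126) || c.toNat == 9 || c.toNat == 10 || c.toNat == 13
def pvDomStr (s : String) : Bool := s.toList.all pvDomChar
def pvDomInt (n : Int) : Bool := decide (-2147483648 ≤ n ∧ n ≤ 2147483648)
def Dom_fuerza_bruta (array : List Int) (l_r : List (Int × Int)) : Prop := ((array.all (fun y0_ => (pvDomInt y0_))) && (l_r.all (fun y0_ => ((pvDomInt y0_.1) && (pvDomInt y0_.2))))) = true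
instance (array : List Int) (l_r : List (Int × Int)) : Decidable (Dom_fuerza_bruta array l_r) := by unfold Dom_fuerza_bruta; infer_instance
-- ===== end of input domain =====

-- B replaces A's per-start recomputation of the abs-difference fold (nested j/k loops)
-- with one left-to-right DP sweep per query that maintains the vector of fold values
-- for every start and sums it once (objective: alternative; same asymptotic cost).

-- ===== PORT A =====
def fuerza_bruta (array : List Int) (l_r : List (Int × Int)) : List Int :=
  l_r.foldl (fun resultados i =>
    let l := i.1 - 1
    let r := i.2 - 1
    let suma : Int :=
      if l = r then PySem.List.pyGetD array l 0
      else if |l - r| = 1 then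
        PySem.List.pyGetD array l 0 + |PySem.List.pyGetD array l 0 - PySem.List.pyGetD array r 0|
      else if PySem.Int.mod l 2 ≠ 0 ∧ PySem.Int.mod r 2 ≠ 0 then
        (PySem.List.pyRange l (r + 1) 1).foldl (fun suma j =>
          suma + (PySem.List.pyRange (j + 1) r 1).foldl
            (fun xor k => |xor - PySem.List.pyGetD array k 0|) (PySem.List.pyGetD array j 0)) 0
      else
        (PySem.List.pyRange l (r + 1) 1).foldl (fun suma j =>
          suma + (PySem.List.pyRange (j + 1) (r + 1) 1).foldl
            (fun xor k => |xor - PySem.List.pyGetD array k 0|) (PySem.List.pyGetD array j 0)) 0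
    resultados ++ [suma]) []

-- ===== PORT B =====
-- the DP sweep: for e = l..hi keep row = [fold value of every start j ≤ e]
def altRow (array : List Int) (l hi : Int) : List Int :=
  (PySem.List.pyRange l (hi + 1) 1).foldl (fun row e =>
    row.map (fun x => |x - PySem.List.pyGetD array e 0|) ++ [PySem.List.pyGetD array e 0]) []

def fuerza_bruta_alt (array : List Int) (l_r : List (Int × Int)) : List Int :=
  l_r.foldl (fun resultados p =>
    let l := p.1 - 1
    let r := p.2 - 1
    let v : Int :=
      if l = r then PySem.List.pyGetD array l 0
      else if |l - r| = 1 then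
        PySem.List.pyGetD array l 0 + |PySem.List.pyGetD array l 0 - PySem.List.pyGetD array r 0|
      else
        let odd := PySem.Int.mod l 2 ≠ 0 ∧ PySem.Int.mod r 2 ≠ 0
        let hi := if odd then r - 1 else r
        let s := (altRow array l hi).sum
        if odd ∧ l ≤ r then s + PySem.List.pyGetD array r 0 else s
    resultados ++ [v]) []

-- ===== PRECONDITION & SPEC =====
-- Pre_ excludes exactly the inputs on which A raises IndexError: a query whose
-- (possibly negative, Python-wrapping) accessed index range leaves [-n, n-1].
def Pre_fuerza_bruta (array : List Int) (l_r : List (Int × Int)) : Prop :=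
  ∀ p ∈ l_r,
    (p.1 ≤ p.2 → -(array.length : Int) ≤ p.1 - 1 ∧ p.2 - 1 < (array.length : Int)) ∧
    (p.1 = p.2 + 1 → -(array.length : Int) ≤ p.2 - 1 ∧ p.1 - 1 < (array.length : Int))
instance (array : List Int) (l_r : List (Int × Int)) : Decidable (Pre_fuerza_bruta array l_r) := by
  unfold Pre_fuerza_bruta; infer_instance

def pvWitness_fuerza_bruta : List Int × (List (Int × Int)) :=
  ([1, 5, 2, 9], [(1, 3), (2, 2), (2, 4), (1, 4), (3, 1), (0, 2)])

def Spec_fuerza_bruta (array : List Int) (l_r : List (Int × Int)) (out : List Int) : Prop := out = fuerza_bruta_alt array l_r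
instance (array : List Int) (l_r : List (Int × Int)) (out : List Int) : Decidable (Spec_fuerza_bruta array l_r out) := by unfold Spec_fuerza_bruta; infer_instance

-- ===== CLAIM (what is proved, stated in full; the proofs are below) =====
def Claim_equal_fuerza_bruta : Prop := ∀ (array : List Int) (l_r : List (Int × Int)), Dom_fuerza_bruta array l_r → Pre_fuerza_bruta array l_r → Spec_fuerza_bruta array l_r (fuerza_bruta array l_r)

-- ===== LEMMAS AND PROOFS =====

-- the fold value of start j with ending index E (inclusive)
def gval (array : List Int) (j E : Int) : Int :=
  (PySem.List.pyRange (j + 1) (E + 1) 1).foldl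
    (fun xor k => |xor - PySem.List.pyGetD array k 0|) (PySem.List.pyGetD array j 0)

lemma gval_self (array : List Int) (j : Int) : gval array j j = PySem.List.pyGetD array j 0 := by
  simp [gval, PySem.List.pyRange_one_eq_nil]

lemma gval_step (array : List Int) (j E : Int) (h : j ≤ E) :
    gval array j (E + 1) = |gval array j E - PySem.List.pyGetD array (E + 1) 0| := by
  unfold gval
  rw [show E + 1 + 1 = (E + 1) + 1 from rfl,
    PySem.List.pyRange_one_succ_right (show j + 1 ≤ E + 1 by omega), List.foldl_append]
  simp

lemma gval_of_lt (array : List Int) (j E : Int) (h : E < j) :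
    gval array j E = PySem.List.pyGetD array j 0 := by
  simp [gval, PySem.List.pyRange_one_eq_nil (show E + 1 ≤ j + 1 by omega)]

lemma altRow_eq (array : List Int) (l : Int) :
    ∀ (n : Nat) (hi : Int), (hi + 1 - l).toNat = n →
      altRow array l hi = (PySem.List.pyRange l (hi + 1) 1).map (fun j => gval array j hi) := by
  intro n
  induction n with
  | zero =>
    intro hi h
    have hle : hi + 1 ≤ l := by omega
    simp [altRow, PySem.List.pyRange_one_eq_nil hle]
  | succ m ih =>
    intro hi h
    have hlt : l ≤ hi := by omega
    have hsplit : PySem.List.pyRange l (hi + 1) 1 = PySem.List.pyRange l hi 1 ++ [hi] :=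
      PySem.List.pyRange_one_succ_right hlt
    have ihm := ih (hi - 1) (by omega)
    unfold altRow at ihm ⊢
    rw [hsplit, List.foldl_append]
    have : hi - 1 + 1 = hi := by omega
    rw [this] at ihm
    rw [ihm]
    simp only [List.foldl_cons, List.foldl_nil, List.map_append, List.map_map, List.map_cons,
      List.map_nil]
    congr 1
    · apply List.map_congr_left
      intro j hj
      have hj' := (PySem.List.mem_pyRange_one).1 hj
      simp only [Function.comp_apply]
      have := gval_step array j (hi - 1) (by omega)
      rw [show hi - 1 + 1 = hi from by omega] at this
      exact this.symm
    · simp [gval_self]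

lemma foldl_sum_g (array : List Int) (lo hi E : Int) :
    (PySem.List.pyRange lo hi 1).foldl (fun s j => s + gval array j E) 0 =
      ((PySem.List.pyRange lo hi 1).map (fun j => gval array j E)).sum := by
  rw [PySem.List.foldl_add]; simp

-- per-query agreement of the two ports (both are total via pyGetD)
lemma query_eq (array : List Int) :
    (fun resultados (i : Int × Int) =>
      let l := i.1 - 1
      let r := i.2 - 1
      let suma : Int :=
        if l = r then PySem.List.pyGetD array l 0
        else if |l - r| = 1 then
          PySem.List.pyGetD array l 0 + |PySem.List.pyGetD array l 0 - PySem.List.pyGetD array r 0|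
        else if PySem.Int.mod l 2 ≠ 0 ∧ PySem.Int.mod r 2 ≠ 0 then
          (PySem.List.pyRange l (r + 1) 1).foldl (fun suma j =>
            suma + (PySem.List.pyRange (j + 1) r 1).foldl
              (fun xor k => |xor - PySem.List.pyGetD array k 0|) (PySem.List.pyGetD array j 0)) 0
        else
          (PySem.List.pyRange l (r + 1) 1).foldl (fun suma j =>
            suma + (PySem.List.pyRange (j + 1) (r + 1) 1).foldl
              (fun xor k => |xor - PySem.List.pyGetD array k 0|) (PySem.List.pyGetD array j 0)) 0
      resultados ++ [suma]) = (fun resultados p =>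
      let l := p.1 - 1
      let r := p.2 - 1
      let v : Int :=
        if l = r then PySem.List.pyGetD array l 0
        else if |l - r| = 1 then
          PySem.List.pyGetD array l 0 + |PySem.List.pyGetD array l 0 - PySem.List.pyGetD array r 0|
        else
          let odd := PySem.Int.mod l 2 ≠ 0 ∧ PySem.Int.mod r 2 ≠ 0
          let hi := if odd then r - 1 else r
          let s := (altRow array l hi).sum
          if odd ∧ l ≤ r then s + PySem.List.pyGetD array r 0 else s
      resultados ++ [v]) := by
  funext res i
  simp only []
  congr 1
  congr 1
  by_cases h1 : i.1 - 1 = i.2 - 1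
  · simp only [if_pos h1]
  by_cases h2 : |i.1 - 1 - (i.2 - 1)| = 1
  · simp only [if_neg h1, if_pos h2]
  by_cases hodd : PySem.Int.mod (i.1 - 1) 2 ≠ 0 ∧ PySem.Int.mod (i.2 - 1) 2 ≠ 0
  · simp only [if_neg h1, if_neg h2, if_pos hodd]
    set l := i.1 - 1 with hl
    set r := i.2 - 1 with hr
    have hfold : (PySem.List.pyRange l (r + 1) 1).foldl (fun suma j =>
        suma + (PySem.List.pyRange (j + 1) r 1).foldl
          (fun xor k => |xor - PySem.List.pyGetD array k 0|) (PySem.List.pyGetD array j 0)) 0 =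
        ((PySem.List.pyRange l (r + 1) 1).map (fun j => gval array j (r - 1))).sum := by
      rw [← foldl_sum_g]
      congr 1
      funext s j
      unfold gval
      rw [show r - 1 + 1 = r from by omega]
    rw [hfold, altRow_eq array l ((r - 1 + 1 - l).toNat) (r - 1) rfl,
      show r - 1 + 1 = r from by omega]
    by_cases hle : l ≤ r
    · rw [if_pos (And.intro hodd hle)]
      rw [PySem.List.pyRange_one_succ_right hle, List.map_append, List.sum_append]
      simp [gval_of_lt array r (r - 1) (by omega)]
    · rw [if_neg (fun hc => hle hc.2)]
      rw [PySem.List.pyRange_one_eq_nil (show r + 1 ≤ l from by omega),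
        PySem.List.pyRange_one_eq_nil (show r ≤ l from by omega)]
  · simp only [if_neg h1, if_neg h2, if_neg hodd]
    set l := i.1 - 1 with hl
    set r := i.2 - 1 with hr
    rw [if_neg (fun hc => hodd hc.1), altRow_eq array l ((r + 1 - l).toNat) r rfl]
    exact foldl_sum_g array l (r + 1) r

-- ===== VERDICT (by name: the statement is the Claim_ definition above) =====
theorem fuerza_bruta_spec : Claim_equal_fuerza_bruta := by
  intro array l_r _ _
  unfold Spec_fuerza_bruta fuerza_bruta fuerza_bruta_alt
  rw [query_eq array]
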